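-- pv_equiv track=rewrite | github.com/projeto-de-algoritmos-2024/Greedy_OnlineJudge | Questão 1/Questao1.py | boardCutting
-- ===== SOURCE A (Python) =====
-- def boardCutting(cost_y, cost_x):
--     MOD = 10**9 + 7
--
--     # Sort the costs in descending order
--     cost_y.sort(reverse=True)
--     cost_x.sort(reverse=True)
--
--     # Initialize segments and costs
--     horizontal_segments = 1
--     vertical_segments = 1
--     total_cost = 0
--
--     i, j = 0, 0
--     while i < len(cost_y) and j < len(cost_x):
--         if cost_y[i] > cost_x[j]:
--             total_cost += cost_y[i] * vertical_segments
--             horizontal_segments += 1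
--             i += 1
--         else:
--             total_cost += cost_x[j] * horizontal_segments
--             vertical_segments += 1
--             j += 1
--
--     # Add the remaining costs
--     while i < len(cost_y):
--         total_cost += cost_y[i] * vertical_segments
--         i += 1
--
--     while j < len(cost_x):
--         total_cost += cost_x[j] * horizontal_segments
--         j += 1
--
--     return total_cost % MOD
-- ===== SOURCE B (Python) =====
-- # Alternative: one combined sorted sequence instead of A's two-pointer merge of two
-- # separately sorted arrays.  Each cost is encoded as an int carrying its axis in the
-- # low bit (y-cut -> 2*c, x-cut -> 2*d + 1), so one descending int sort yields the cut
-- # order (ties: x-cuts first, which never changes the total).  A single pass then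
-- # applies each cut.  Return-value equivalence only: A sorts both argument lists in
-- # place, B does not mutate its arguments.
-- def boardCutting(cost_y, cost_x):
--     MOD = 10**9 + 7
--     merged = sorted([2 * c for c in cost_y] + [2 * d + 1 for d in cost_x], reverse=True)
--     horizontal_segments = 1
--     vertical_segments = 1
--     total = 0
--     for m in merged:
--         if m % 2:  # x-cut of cost m // 2
--             total += (m // 2) * horizontal_segments
--             vertical_segments += 1
--         else:      # y-cut of cost m // 2
--             total += (m // 2) * vertical_segments
--             horizontal_segments += 1
--     return total % MOD
-- ===== Notes on version B (the rewrite author's own statement) =====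
-- stated objective: alternative
-- what changed: Replaces A's two in-place sorts plus a two-pointer merge (with two remainder loops) by one combined descending sort of both cost arrays (axis encoded in the cost's low bit, ties to x-cuts, provably irrelevant to the total) followed by a single pass; B does not mutate its arguments (A sorts both lists in place), return values agree everywhere.
import Mathlib
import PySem

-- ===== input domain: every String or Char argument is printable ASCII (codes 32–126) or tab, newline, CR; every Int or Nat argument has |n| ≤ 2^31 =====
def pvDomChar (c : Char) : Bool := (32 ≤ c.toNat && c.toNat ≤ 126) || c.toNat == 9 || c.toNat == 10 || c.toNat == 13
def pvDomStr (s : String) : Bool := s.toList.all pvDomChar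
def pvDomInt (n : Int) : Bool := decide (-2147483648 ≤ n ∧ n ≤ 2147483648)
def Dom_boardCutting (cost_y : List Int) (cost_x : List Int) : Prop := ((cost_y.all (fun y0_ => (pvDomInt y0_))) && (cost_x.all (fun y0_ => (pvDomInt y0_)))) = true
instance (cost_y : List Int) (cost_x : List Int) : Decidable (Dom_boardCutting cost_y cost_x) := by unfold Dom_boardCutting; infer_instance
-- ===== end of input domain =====

-- B replaces A's two-pointer merge of two separately sorted arrays by one combined sort
-- (axis encoded in the cost's low bit; ties go to x-cuts, which never changes the total)
-- and a single pass; equivalence is about the RETURN value only: A sorts both argument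
-- lists in place, B does not mutate its arguments.

-- ===== PORT A =====
-- the main `while i < len(cost_y) and j < len(cost_x)` loop over the two sorted lists,
-- followed by the two remainder while loops (folds over what is left)
def pvALoop (ys xs : List Int) (h v t : Int) : Int :=
  match ys, xs with
  | y :: ys', x :: xs' =>
      if y > x then pvALoop ys' (x :: xs') (h + 1) v (t + y * v)
      else pvALoop (y :: ys') xs' h (v + 1) (t + x * h)
  | ys', [] => ys'.foldl (fun t c => t + c * v) t
  | [], xs' => xs'.foldl (fun t d => t + d * h) t
termination_by ys.length + xs.length

def boardCutting (cost_y : List Int) (cost_x : List Int) : Int :=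
  let MOD : Int := 10 ^ 9 + 7
  let ys := PySem.List.sorted cost_y (fun c => c) true   -- cost_y.sort(reverse=True)
  let xs := PySem.List.sorted cost_x (fun c => c) true   -- cost_x.sort(reverse=True)
  PySem.Int.mod (pvALoop ys xs 1 1 0) MOD

-- ===== PORT B =====
-- Source B's `for m in merged:` loop with its (horizontal, vertical, total) state
def pvBLoop (ms : List Int) (h v t : Int) : Int :=
  match ms with
  | [] => t
  | m :: ms' =>
      if PySem.Int.mod m 2 ≠ 0 then                              -- `if m % 2:` x-cut
        pvBLoop ms' h (v + 1) (t + PySem.Int.floordiv m 2 * h)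
      else                                                       -- y-cut
        pvBLoop ms' (h + 1) v (t + PySem.Int.floordiv m 2 * v)

def boardCutting_alt (cost_y : List Int) (cost_x : List Int) : Int :=
  let MOD : Int := 10 ^ 9 + 7
  let merged := PySem.List.sorted ((cost_y.map (fun c => 2 * c)) ++ (cost_x.map (fun d => 2 * d + 1))) (fun m => m) true
  PySem.Int.mod (pvBLoop merged 1 1 0) MOD

-- ===== PRECONDITION & SPEC =====
def Spec_boardCutting (cost_y : List Int) (cost_x : List Int) (out : Int) : Prop := out = boardCutting_alt cost_y cost_x
instance (cost_y : List Int) (cost_x : List Int) (out : Int) : Decidable (Spec_boardCutting cost_y cost_x out) := by unfold Spec_boardCutting; infer_instance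

-- ===== CLAIM (what is proved, stated in full; the proofs are below) =====
def Claim_equal_boardCutting : Prop := ∀ (cost_y : List Int) (cost_x : List Int), Dom_boardCutting cost_y cost_x → Spec_boardCutting cost_y cost_x (boardCutting cost_y cost_x)

-- ===== LEMMAS AND PROOFS =====

-- Both loops are shown equal to the same closed form: each y-cut of cost c contributes
-- c·(v₀ + #{x-cuts of cost ≥ c}), each x-cut of cost d contributes d·(h₀ + #{y-cuts of cost > d}).

-- A's merge loop on two descending-sorted lists equals the closed-form count sums.
lemma pvALoop_eq (ys xs : List Int) (h v t : Int)
    (hys : ys.Pairwise (· ≥ ·)) (hxs : xs.Pairwise (· ≥ ·)) :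
    pvALoop ys xs h v t =
      t + (ys.map (fun c => c * (v + (xs.countP (fun d => d ≥ c) : Int)))).sum
        + (xs.map (fun d => d * (h + (ys.countP (fun c => c > d) : Int)))).sum := by
  fun_induction pvALoop ys xs h v t with
  | case1 h v t y ys' x xs' hyx ih =>
    rw [List.pairwise_cons] at hys hxs
    obtain ⟨hy, hys'⟩ := hys
    obtain ⟨hx, hxs'⟩ := hxs
    rw [ih hys' (List.pairwise_cons.2 ⟨hx, hxs'⟩)]
    have hcnt0 : (x :: xs').countP (fun d => decide (d ≥ y)) = 0 := by
      rw [List.countP_eq_zero]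
      intro d hd
      simp only [decide_eq_true_eq, not_le]
      rcases List.mem_cons.1 hd with rfl | hd'
      · exact hyx
      · exact lt_of_le_of_lt (hx d hd') hyx
    have hmap : (x :: xs').map (fun d => d * (h + (((y :: ys').countP (fun c => decide (c > d)) : Nat) : Int)))
        = (x :: xs').map (fun d => d * ((h + 1) + ((ys'.countP (fun c => decide (c > d)) : Nat) : Int))) := by
      refine List.map_congr_left ?_
      intro d hd
      have hdy : y > d := by
        rcases List.mem_cons.1 hd with rfl | hd'
        · exact hyx
        · exact lt_of_le_of_lt (hx d hd') hyx
      rw [List.countP_cons]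
      simp only [show decide (y > d) = true by simpa using hdy, if_true]
      push_cast; ring
    simp only [List.map_cons, List.sum_cons, hcnt0, hmap]
    push_cast; ring
  | case2 h v t y ys' x xs' hyx ih =>
    rw [List.pairwise_cons] at hys hxs
    obtain ⟨hy, hys'⟩ := hys
    obtain ⟨hx, hxs'⟩ := hxs
    rw [ih (List.pairwise_cons.2 ⟨hy, hys'⟩) hxs']
    have hyx' : y ≤ x := not_lt.1 hyx
    have hcnt0 : (y :: ys').countP (fun c => decide (c > x)) = 0 := by
      rw [List.countP_eq_zero]
      intro c hc
      simp only [decide_eq_true_eq, not_lt]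
      rcases List.mem_cons.1 hc with rfl | hc'
      · exact hyx'
      · exact le_trans (hy c hc') hyx'
    have hmap : (y :: ys').map (fun c => c * (v + (((x :: xs').countP (fun d => decide (d ≥ c)) : Nat) : Int)))
        = (y :: ys').map (fun c => c * ((v + 1) + ((xs'.countP (fun d => decide (d ≥ c)) : Nat) : Int))) := by
      refine List.map_congr_left ?_
      intro c hc
      have hcx : x ≥ c := by
        rcases List.mem_cons.1 hc with rfl | hc'
        · exact hyx'
        · exact le_trans (hy c hc') hyx'
      rw [List.countP_cons]
      simp only [show decide (x ≥ c) = true by simpa using hcx, if_true]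
      push_cast; ring
    simp only [List.map_cons, List.sum_cons, hcnt0, hmap]
    push_cast; ring
  | case3 h v t ys' =>
    simp only [List.countP_nil, List.map_nil, List.sum_nil, Nat.cast_zero, add_zero]
    rw [PySem.List.foldl_add ys' (fun c => c * v) t]
  | case4 h v t xs' _ =>
    simp only [List.countP_nil, List.map_nil, List.sum_nil, Nat.cast_zero, add_zero]
    rw [PySem.List.foldl_add xs' (fun d => d * h) t]

-- B's single pass over a descending-sorted encoded list equals the same closed form,
-- with the comparisons expressed on the encoded values (odd = x-cut, even = y-cut).
lemma pvBLoop_eq (ms : List Int) (h v t : Int) (hms : ms.Pairwise (· ≥ ·)) :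
    pvBLoop ms h v t =
      t + (ms.map (fun m =>
        PySem.Int.floordiv m 2 *
          (if PySem.Int.mod m 2 ≠ 0 then
            h + (ms.countP (fun c => PySem.Int.mod c 2 = 0 ∧ c > m) : Int)
          else
            v + (ms.countP (fun d => PySem.Int.mod d 2 ≠ 0 ∧ d ≥ m) : Int)))).sum := by
  induction ms generalizing h v t with
  | nil => simp [pvBLoop]
  | cons m0 tl ih =>
    rw [List.pairwise_cons] at hms
    obtain ⟨hmax, htl⟩ := hms
    have hm2 : ∀ a : Int, PySem.Int.mod a 2 = a % 2 := fun a => PySem.Int.mod_eq_emod_of_pos (by norm_num)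
    by_cases hodd : PySem.Int.mod m0 2 ≠ 0
    · rw [pvBLoop, if_pos hodd, ih _ _ _ htl]
      have hcnt0 : (m0 :: tl).countP (fun c => decide (PySem.Int.mod c 2 = 0 ∧ c > m0)) = 0 := by
        rw [List.countP_eq_zero]
        intro c hc
        simp only [decide_eq_true_eq, not_and, not_lt]
        intro _
        rcases List.mem_cons.1 hc with rfl | hc'
        · exact le_refl _
        · exact hmax c hc'
      have hmap : tl.map (fun m =>
            PySem.Int.floordiv m 2 *
              (if PySem.Int.mod m 2 ≠ 0 then
                h + ((m0 :: tl).countP (fun c => decide (PySem.Int.mod c 2 = 0 ∧ c > m)) : Int)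
              else
                v + ((m0 :: tl).countP (fun d => decide (PySem.Int.mod d 2 ≠ 0 ∧ d ≥ m)) : Int)))
          = tl.map (fun m =>
            PySem.Int.floordiv m 2 *
              (if PySem.Int.mod m 2 ≠ 0 then
                h + (tl.countP (fun c => decide (PySem.Int.mod c 2 = 0 ∧ c > m)) : Int)
              else
                v + 1 + (tl.countP (fun d => decide (PySem.Int.mod d 2 ≠ 0 ∧ d ≥ m)) : Int))) := by
        refine List.map_congr_left ?_
        intro m hm
        by_cases hmo : PySem.Int.mod m 2 ≠ 0
        · rw [if_pos hmo, if_pos hmo, List.countP_cons,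
            show (decide (PySem.Int.mod m0 2 = 0 ∧ m0 > m)) = false by
              simp only [decide_eq_false_iff_not]; rintro ⟨he, _⟩; exact hodd (by omega)]
          simp
        · rw [if_neg hmo, if_neg hmo, List.countP_cons,
            show (decide (PySem.Int.mod m0 2 ≠ 0 ∧ m0 ≥ m)) = true by
              simp only [decide_eq_true_eq]; exact ⟨hodd, hmax m hm⟩]
          simp only [if_true]; push_cast; ring
      rw [List.map_cons, List.sum_cons, if_pos hodd, hcnt0, hmap]
      push_cast; ring
    · rw [pvBLoop, if_neg hodd, ih _ _ _ htl]
      have heven : PySem.Int.mod m0 2 = 0 := not_not.1 hodd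
      have hcnt0 : (m0 :: tl).countP (fun d => decide (PySem.Int.mod d 2 ≠ 0 ∧ d ≥ m0)) = 0 := by
        rw [List.countP_eq_zero]
        intro d hd
        simp only [decide_eq_true_eq, not_and, not_le]
        intro hdo
        rcases List.mem_cons.1 hd with rfl | hd'
        · exact absurd heven hdo
        · have h1 := hmax d hd'
          rw [hm2] at hdo heven
          omega
      have hmap : tl.map (fun m =>
            PySem.Int.floordiv m 2 *
              (if PySem.Int.mod m 2 ≠ 0 then
                h + ((m0 :: tl).countP (fun c => decide (PySem.Int.mod c 2 = 0 ∧ c > m)) : Int)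
              else
                v + ((m0 :: tl).countP (fun d => decide (PySem.Int.mod d 2 ≠ 0 ∧ d ≥ m)) : Int)))
          = tl.map (fun m =>
            PySem.Int.floordiv m 2 *
              (if PySem.Int.mod m 2 ≠ 0 then
                h + 1 + (tl.countP (fun c => decide (PySem.Int.mod c 2 = 0 ∧ c > m)) : Int)
              else
                v + (tl.countP (fun d => decide (PySem.Int.mod d 2 ≠ 0 ∧ d ≥ m)) : Int))) := by
        refine List.map_congr_left ?_
        intro m hm
        by_cases hmo : PySem.Int.mod m 2 ≠ 0
        · rw [if_pos hmo, if_pos hmo, List.countP_cons,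
            show (decide (PySem.Int.mod m0 2 = 0 ∧ m0 > m)) = true by
              simp only [decide_eq_true_eq]
              refine ⟨heven, ?_⟩
              have h1 := hmax m hm
              rw [hm2] at hmo heven
              omega]
          simp only [if_true]; push_cast; ring
        · rw [if_neg hmo, if_neg hmo, List.countP_cons,
            show (decide (PySem.Int.mod m0 2 ≠ 0 ∧ m0 ≥ m)) = false by
              simp only [decide_eq_false_iff_not]; rintro ⟨hdo, _⟩; exact hdo heven]
          simp
      rw [List.map_cons, List.sum_cons, if_neg hodd, hcnt0, hmap]
      push_cast; ring

-- ===== VERDICT (by name: the statement is the Claim_ definition above) =====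
theorem boardCutting_spec : Claim_equal_boardCutting := by
  intro cost_y cost_x _
  unfold Spec_boardCutting boardCutting boardCutting_alt
  dsimp only
  have hm2 : ∀ a : Int, PySem.Int.mod a 2 = a % 2 := fun a => PySem.Int.mod_eq_emod_of_pos (by norm_num)
  -- A's side: reduce the merge on the sorted lists to the closed form over the originals
  have hpy := PySem.List.sorted_perm cost_y (fun c => c) true
  have hpx := PySem.List.sorted_perm cost_x (fun c => c) true
  have hsy : (PySem.List.sorted cost_y (fun c => c) true).Pairwise (· ≥ ·) :=
    (PySem.List.sorted_pairwise_rev cost_y (fun c => c)).imp (fun hab => hab)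
  have hsx : (PySem.List.sorted cost_x (fun c => c) true).Pairwise (· ≥ ·) :=
    (PySem.List.sorted_pairwise_rev cost_x (fun c => c)).imp (fun hab => hab)
  rw [pvALoop_eq _ _ _ _ _ hsy hsx]
  have hcx : ∀ p : Int → Bool, (PySem.List.sorted cost_x (fun c => c) true).countP p = cost_x.countP p :=
    fun p => hpx.countP_eq p
  have hcy : ∀ p : Int → Bool, (PySem.List.sorted cost_y (fun c => c) true).countP p = cost_y.countP p :=
    fun p => hpy.countP_eq p
  simp only [hcx, hcy]
  rw [(hpy.map (fun c => c * (1 + (cost_x.countP (fun d => d ≥ c) : Int)))).sum_eq,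
      (hpx.map (fun d => d * (1 + (cost_y.countP (fun c => c > d) : Int)))).sum_eq]
  -- B's side: reduce the single pass on the sorted encoded union to the same closed form
  have hpm := PySem.List.sorted_perm ((cost_y.map (fun c => 2 * c)) ++ (cost_x.map (fun d => 2 * d + 1))) (fun m => m) true
  have hsm : (PySem.List.sorted ((cost_y.map (fun c => 2 * c)) ++ (cost_x.map (fun d => 2 * d + 1))) (fun m => m) true).Pairwise (· ≥ ·) :=
    (PySem.List.sorted_pairwise_rev _ (fun m => m)).imp (fun hab => hab)
  rw [pvBLoop_eq _ 1 1 0 hsm]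
  have hcm : ∀ p : Int → Bool, (PySem.List.sorted ((cost_y.map (fun c => 2 * c)) ++ (cost_x.map (fun d => 2 * d + 1))) (fun m => m) true).countP p = ((cost_y.map (fun c => 2 * c)) ++ (cost_x.map (fun d => 2 * d + 1))).countP p :=
    fun p => hpm.countP_eq p
  simp only [hcm]
  rw [(hpm.map _).sum_eq]
  rw [List.map_append, List.sum_append, List.map_map, List.map_map]
  -- decode the y-part of B's sum
  have hY : cost_y.map ((fun m =>
        PySem.Int.floordiv m 2 *
          (if PySem.Int.mod m 2 ≠ 0 then
            1 + (((cost_y.map (fun c => 2 * c)) ++ (cost_x.map (fun d => 2 * d + 1))).countP (fun c => decide (PySem.Int.mod c 2 = 0 ∧ c > m)) : Int)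
          else
            1 + (((cost_y.map (fun c => 2 * c)) ++ (cost_x.map (fun d => 2 * d + 1))).countP (fun d => decide (PySem.Int.mod d 2 ≠ 0 ∧ d ≥ m)) : Int))) ∘ (fun c => 2 * c))
      = cost_y.map (fun c => c * (1 + (cost_x.countP (fun d => d ≥ c) : Int))) := by
    refine List.map_congr_left ?_
    intro c _
    simp only [Function.comp]
    have e1 : ¬ (PySem.Int.mod (2 * c) 2 ≠ 0) := by rw [hm2]; omega
    rw [if_neg e1]
    have e2 : PySem.Int.floordiv (2 * c) 2 = c := by
      rw [PySem.Int.floordiv_eq_ediv_of_pos (by norm_num)]; omega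
    rw [e2, List.countP_append, List.countP_map, List.countP_map]
    have e3 : cost_y.countP ((fun d => decide (PySem.Int.mod d 2 ≠ 0 ∧ d ≥ 2 * c)) ∘ (fun a => 2 * a)) = 0 := by
      rw [List.countP_eq_zero]
      intro a _
      simp only [Function.comp, decide_eq_true_eq, not_and, hm2]
      omega
    have e4 : cost_x.countP ((fun d => decide (PySem.Int.mod d 2 ≠ 0 ∧ d ≥ 2 * c)) ∘ (fun a => 2 * a + 1)) = cost_x.countP (fun d => decide (d ≥ c)) := by
      refine List.countP_congr ?_
      intro a _
      simp only [Function.comp, decide_eq_true_eq, hm2]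
      omega
    rw [e3, e4]
    push_cast; ring
  -- decode the x-part of B's sum
  have hX : cost_x.map ((fun m =>
        PySem.Int.floordiv m 2 *
          (if PySem.Int.mod m 2 ≠ 0 then
            1 + (((cost_y.map (fun c => 2 * c)) ++ (cost_x.map (fun d => 2 * d + 1))).countP (fun c => decide (PySem.Int.mod c 2 = 0 ∧ c > m)) : Int)
          else
            1 + (((cost_y.map (fun c => 2 * c)) ++ (cost_x.map (fun d => 2 * d + 1))).countP (fun d => decide (PySem.Int.mod d 2 ≠ 0 ∧ d ≥ m)) : Int))) ∘ (fun d => 2 * d + 1))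
      = cost_x.map (fun d => d * (1 + (cost_y.countP (fun c => c > d) : Int))) := by
    refine List.map_congr_left ?_
    intro d _
    simp only [Function.comp]
    have e1 : PySem.Int.mod (2 * d + 1) 2 ≠ 0 := by rw [hm2]; omega
    rw [if_pos e1]
    have e2 : PySem.Int.floordiv (2 * d + 1) 2 = d := by
      rw [PySem.Int.floordiv_eq_ediv_of_pos (by norm_num)]; omega
    rw [e2, List.countP_append, List.countP_map, List.countP_map]
    have e3 : cost_x.countP ((fun c => decide (PySem.Int.mod c 2 = 0 ∧ c > 2 * d + 1)) ∘ (fun a => 2 * a + 1)) = 0 := by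
      rw [List.countP_eq_zero]
      intro a _
      simp only [Function.comp, decide_eq_true_eq, not_and, hm2]
      omega
    have e4 : cost_y.countP ((fun c => decide (PySem.Int.mod c 2 = 0 ∧ c > 2 * d + 1)) ∘ (fun a => 2 * a)) = cost_y.countP (fun c => decide (c > d)) := by
      refine List.countP_congr ?_
      intro a _
      simp only [Function.comp, decide_eq_true_eq, hm2]
      omega
    rw [e3, e4]
    push_cast; ring
  rw [hY, hX]
  ring_nf
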